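-- pv_equiv track=rewrite | github.com/juandavidjd/extracii | 1_renombrar_seo_kaiqi_v7.5.py | encontrar_match_para_imagen
-- ===== SOURCE A (Python) =====
-- def encontrar_match_para_imagen(fname: str, inv_records, jc_records, yoko_records):
--     """
--     Busca el mejor match para el nombre de archivo en el orden:
--     1) Inventario
--     2) JC
--     3) YOKOMAR
--     Retorna rec dict o None.
--     """
--     name_lower = fname.lower()
--
--     # 1) Buscar en Inventario (CODIGO NEW)
--     for code, rec in inv_records.items():
--         if str(code).lower() in name_lower:
--             return rec
--
--     # 2) Buscar en JC (CODIGO)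
--     for code, rec in jc_records.items():
--         if str(code).lower() in name_lower:
--             return rec
--
--     # 3) Buscar en YOKOMAR (REFERENCIA)
--     for code, rec in yoko_records.items():
--         if str(code).lower() in name_lower:
--             return rec
--
--     return None
-- ===== SOURCE B (Python) =====
-- def encontrar_match_para_imagen(fname, inv_records, jc_records, yoko_records):
--     name = fname.lower()
--     # one indexing pass: lowered code -> (tier-and-order rank, rec), first occurrence wins
--     index = {}
--     rank = 0
--     for records in (inv_records, jc_records, yoko_records):
--         for code, rec in records.items():
--             key = str(code).lower()
--             if key not in index:
--                 index[key] = (rank, rec)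
--             rank += 1
--     # enumerate substrings of the filename no longer than the longest code;
--     # keep the hit with the lowest rank
--     maxlen = max(map(len, index), default=0)
--     best = None
--     n = len(name)
--     for i in range(n + 1):
--         for j in range(i, min(n, i + maxlen) + 1):
--             hit = index.get(name[i:j])
--             if hit is not None and (best is None or hit[0] < best[0]):
--                 best = hit
--     return None if best is None else best[1]
-- ===== Notes on version B (the rewrite author's own statement) =====
-- stated objective: alternative
-- what changed: Instead of scanning every record and substring-searching its lowered code inside the filename, B builds one rank-indexed dictionary keyed by lowered code in a single pass over the three tables, then enumerates the filename's substrings up to the longest code's length, looking each up in the dictionary and keeping the hit with the lowest (tier, insertion) rank.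
import Mathlib
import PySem

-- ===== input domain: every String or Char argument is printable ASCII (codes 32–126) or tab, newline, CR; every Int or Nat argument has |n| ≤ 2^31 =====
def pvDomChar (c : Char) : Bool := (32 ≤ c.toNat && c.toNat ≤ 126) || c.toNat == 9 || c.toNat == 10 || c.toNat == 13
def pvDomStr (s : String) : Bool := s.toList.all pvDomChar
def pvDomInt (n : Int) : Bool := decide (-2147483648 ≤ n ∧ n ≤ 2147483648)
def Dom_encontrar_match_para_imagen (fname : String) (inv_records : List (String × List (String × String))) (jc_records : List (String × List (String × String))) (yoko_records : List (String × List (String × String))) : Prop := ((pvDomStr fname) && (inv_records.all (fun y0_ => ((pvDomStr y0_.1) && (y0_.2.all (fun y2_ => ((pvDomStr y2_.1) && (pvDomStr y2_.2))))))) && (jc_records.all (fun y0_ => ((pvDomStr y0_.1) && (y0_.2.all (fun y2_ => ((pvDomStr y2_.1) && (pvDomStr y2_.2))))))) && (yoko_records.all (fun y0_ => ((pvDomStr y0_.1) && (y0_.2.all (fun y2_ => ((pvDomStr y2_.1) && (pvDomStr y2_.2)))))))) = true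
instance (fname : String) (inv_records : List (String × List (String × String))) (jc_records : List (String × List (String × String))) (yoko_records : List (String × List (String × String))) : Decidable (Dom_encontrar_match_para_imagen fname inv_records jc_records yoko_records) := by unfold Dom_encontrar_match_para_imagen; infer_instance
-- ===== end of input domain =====

-- B replaces A's scan over all records (each doing a substring search in the filename) by one
-- indexing pass over the records plus an enumeration of the filename's substrings (capped at the
-- longest code length) looked up in that index, keeping the hit of lowest insertion rank;
-- objective: alternative (a genuinely different algorithm of comparable measured cost).

-- ===== PORT A =====
-- one 'for code, rec in records.items(): if str(code).lower() in name_lower: return rec' loop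
def pvLoopA (name : String) : List (String × List (String × String)) → Option (List (String × String))
  | [] => none
  | (code, rec) :: rest =>
    if PySem.Str.isIn (PySem.Str.lower code) name then some rec else pvLoopA name rest

def encontrar_match_para_imagen (fname : String) (inv_records : List (String × List (String × String))) (jc_records : List (String × List (String × String))) (yoko_records : List (String × List (String × String))) : Option (List (String × String)) :=
  let name_lower := PySem.Str.lower fname
  match pvLoopA name_lower inv_records with
  | some rec => some rec
  | none =>
    match pvLoopA name_lower jc_records with
    | some rec => some rec
    | none => pvLoopA name_lower yoko_records

-- ===== PORT B =====
-- 'for code, rec in records.items(): key = code.lower(); if key not in index: index[key] = (rank, rec); rank += 1'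
def pvIndexOne (st : PySem.Dict String (Int × List (String × String)) × Int)
    (records : List (String × List (String × String))) :
    PySem.Dict String (Int × List (String × String)) × Int :=
  records.foldl (fun st p =>
    let key := PySem.Str.lower p.1
    ((if st.1.contains key then st.1 else st.1.insert key (st.2, p.2)), st.2 + 1)) st

-- body of the inner loop: hit = index.get(name[i:j]); if hit is not None and (best is None or hit[0] < best[0]): best = hit
def pvBestStep (index : PySem.Dict String (Int × List (String × String))) (name : String)
    (best : Option (Int × List (String × String))) (i j : Int) :
    Option (Int × List (String × String)) :=
  match index.get? (PySem.Str.slice name (some i) (some j)) with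
  | none => best
  | some hit =>
    match best with
    | none => some hit
    | some b => if hit.1 < b.1 then some hit else best

def encontrar_match_para_imagen_alt (fname : String) (inv_records : List (String × List (String × String))) (jc_records : List (String × List (String × String))) (yoko_records : List (String × List (String × String))) : Option (List (String × String)) :=
  let name := PySem.Str.lower fname
  let st := pvIndexOne (pvIndexOne (pvIndexOne (PySem.Dict.empty, 0) inv_records) jc_records) yoko_records
  let index := st.1
  let maxlen : Int := index.keys.foldl (fun m k => max m (PySem.Str.len k)) 0
  let n : Int := PySem.Str.len name
  let best := (PySem.List.pyRange 0 (n + 1) 1).foldl (fun best i =>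
    (PySem.List.pyRange i (min n (i + maxlen) + 1) 1).foldl
      (fun best j => pvBestStep index name best i j) best) none
  best.map (·.2)

-- ===== PRECONDITION & SPEC =====
def Spec_encontrar_match_para_imagen (fname : String) (inv_records : List (String × List (String × String))) (jc_records : List (String × List (String × String))) (yoko_records : List (String × List (String × String))) (out : Option (List (String × String))) : Prop := out = encontrar_match_para_imagen_alt fname inv_records jc_records yoko_records
instance (fname : String) (inv_records : List (String × List (String × String))) (jc_records : List (String × List (String × String))) (yoko_records : List (String × List (String × String))) (out : Option (List (String × String))) : Decidable (Spec_encontrar_match_para_imagen fname inv_records jc_records yoko_records out) := by unfold Spec_encontrar_match_para_imagen; infer_instance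

-- ===== CLAIM (what is proved, stated in full; the proofs are below) =====
def Claim_equal_encontrar_match_para_imagen : Prop := ∀ (fname : String) (inv_records : List (String × List (String × String))) (jc_records : List (String × List (String × String))) (yoko_records : List (String × List (String × String))), Dom_encontrar_match_para_imagen fname inv_records jc_records yoko_records → Spec_encontrar_match_para_imagen fname inv_records jc_records yoko_records (encontrar_match_para_imagen fname inv_records jc_records yoko_records)

-- ===== LEMMAS AND PROOFS =====

-- abbreviations used only by the proofs
def pvKey (p : String × List (String × String)) : String := PySem.Str.lower p.1

def pvMatch (name : String) (p : String × List (String × String)) : Bool :=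
  PySem.Str.isIn (pvKey p) name

-- first entry (with its running rank) whose lowered code is k
def pvFirstKey (k : String) : List (String × List (String × String)) → Int → Option (Int × List (String × String))
  | [], _ => none
  | p :: t, r => if pvKey p == k then some (r, p.2) else pvFirstKey k t (r + 1)

-- the running min-by-rank fold, over an explicit candidate list
def pvFoldMin (cands : List (Int × List (String × String)))
    (acc : Option (Int × List (String × String))) : Option (Int × List (String × String)) :=
  cands.foldl (fun best hit =>
    match best with
    | none => some hit
    | some b => if hit.1 < b.1 then some hit else best) acc

-- ---- A-side characterisation ----
theorem pvLoopA_eq_find? (name : String) (l : List (String × List (String × String))) :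
    pvLoopA name l = (l.find? (pvMatch name)).map (·.2) := by
  induction l with
  | nil => rfl
  | cons p t ih =>
    obtain ⟨c, r⟩ := p
    simp only [pvLoopA, List.find?_cons, pvMatch, pvKey]
    cases h : PySem.Str.isIn (PySem.Str.lower c) name <;> simp [ih, pvMatch]

theorem pvA_eq_find? (fname : String) (inv jc yoko : List (String × List (String × String))) :
    encontrar_match_para_imagen fname inv jc yoko =
      (((inv ++ jc ++ yoko).find? (pvMatch (PySem.Str.lower fname))).map (·.2)) := by
  simp only [encontrar_match_para_imagen, pvLoopA_eq_find?, List.find?_append]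
  rcases h1 : (inv.find? (pvMatch (PySem.Str.lower fname))) with _ | v1 <;>
    rcases h2 : (jc.find? (pvMatch (PySem.Str.lower fname))) with _ | v2 <;>
      simp [Option.orElse]

-- ---- B-side: the index dict ----
theorem pvIndexOne_get? (l : List (String × List (String × String)))
    (d : PySem.Dict String (Int × List (String × String))) (r : Int) (k : String) :
    (pvIndexOne (d, r) l).1.get? k = (d.get? k).orElse (fun _ => pvFirstKey k l r) := by
  induction l generalizing d r with
  | nil => cases h : d.get? k <;> simp [pvIndexOne, pvFirstKey, h, Option.orElse]
  | cons p t ih =>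
    simp only [pvIndexOne, List.foldl_cons] at *
    by_cases hc : d.contains (pvKey p)
    · simp only [pvKey] at hc
      rw [show (if d.contains (PySem.Str.lower p.1) then d else d.insert (PySem.Str.lower p.1) (r, p.2)) = d by simp [hc]]
      rw [ih]
      by_cases hk : pvKey p == k
      · -- k is already in d, so the orElse never reaches pvFirstKey
        have hkk : (pvKey p) = k := by simpa using hk
        have : d.get? k ≠ none := by
          rw [ne_eq, PySem.Dict.get?_eq_none_iff_contains]
          subst hkk
          simp [pvKey] at hc ⊢
          simp [hc]
        rcases h : d.get? k with _ | v
        · exact absurd h this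
        · simp [Option.orElse]
      · simp [pvFirstKey, hk]
    · simp only [pvKey] at hc
      rw [show (if d.contains (PySem.Str.lower p.1) then d else d.insert (PySem.Str.lower p.1) (r, p.2)) = (d.insert (PySem.Str.lower p.1) (r, p.2)) by simp [hc]]
      rw [ih]
      by_cases hk : pvKey p == k
      · have hkk : (pvKey p) = k := by simpa using hk
        have hdk : d.get? k = none := by
          rw [PySem.Dict.get?_eq_none_iff_contains]; subst hkk; simpa [pvKey] using hc
        rw [pvKey] at hkk
        rw [hkk, PySem.Dict.get?_insert_self, hdk]
        simp [Option.orElse, pvFirstKey, hk]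
      · have hkk : k ≠ pvKey p := fun h => by simp [h] at hk
        rw [PySem.Dict.get?_insert_of_ne _ _ (by simpa [pvKey] using hkk)]
        simp [pvFirstKey, hk]

theorem pvFirstKey_some (k : String) (l : List (String × List (String × String))) (r : Int)
    (q : Int) (v : List (String × String)) (h : pvFirstKey k l r = some (q, v)) :
    ∃ (n : Nat) (hn : n < l.length), q = r + n ∧ pvKey l[n] = k ∧ v = l[n].2 ∧
      ∀ m (hm : m < n), pvKey l[m] ≠ k := by
  induction l generalizing r with
  | nil => simp [pvFirstKey] at h
  | cons p t ih =>
    simp only [pvFirstKey] at h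
    by_cases hk : pvKey p == k
    · simp only [hk, if_pos] at h
      obtain ⟨hq, hv⟩ := Prod.mk.injEq .. ▸ (Option.some.injEq .. ▸ h)
      refine ⟨0, by simp, by omega, by simpa using hk, by simp [← hv], by omega⟩
    · simp only [hk, if_neg, Bool.false_eq_true, not_false_iff] at h
      obtain ⟨n, hn, hq, hkey, hv, hfirst⟩ := ih (r + 1) h
      refine ⟨n + 1, by simpa using hn, by omega, by simpa using hkey, by simpa using hv, ?_⟩
      intro m hm
      cases m with
      | zero => intro hcon; exact absurd (by simpa using hcon) (by simpa using hk)
      | succ m' => intro hcon; exact hfirst m' (by omega) (by simpa using hcon)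

theorem pvFirstKey_none (k : String) (l : List (String × List (String × String))) (r : Int)
    (h : pvFirstKey k l r = none) : ∀ (n : Nat) (hn : n < l.length), pvKey l[n] ≠ k := by
  induction l generalizing r with
  | nil => intro n hn; simp at hn
  | cons p t ih =>
    simp only [pvFirstKey] at h
    by_cases hk : pvKey p == k
    · simp [hk] at h
    · simp only [hk, if_neg, Bool.false_eq_true, not_false_iff] at h
      intro n hn
      cases n with
      | zero => simpa using fun hcon => absurd (by simp [hcon] : pvKey p == k) (by simpa using hk)
      | succ m => exact fun hcon => ih (r + 1) h m (by simpa using hn) (by simpa using hcon)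

-- ---- flattening the nested loop ----
def pvPairs (n maxlen : Int) : List (Int × Int) :=
  (PySem.List.pyRange 0 (n + 1) 1).flatMap
    (fun i => (PySem.List.pyRange i (min n (i + maxlen) + 1) 1).map (fun j => (i, j)))

theorem pvFold_pairs (index : PySem.Dict String (Int × List (String × String)))
    (name : String) (l : List (Int × Int)) (acc : Option (Int × List (String × String))) :
    l.foldl (fun best ij => pvBestStep index name best ij.1 ij.2) acc
    = pvFoldMin (l.filterMap (fun ij => index.get? (PySem.Str.slice name (some ij.1) (some ij.2)))) acc := by
  induction l generalizing acc with
  | nil => rfl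
  | cons ij t ih =>
    simp only [List.foldl_cons, List.filterMap_cons]
    rcases h : index.get? (PySem.Str.slice name (some ij.1) (some ij.2)) with _ | hit
    · rw [ih]
      simp [pvBestStep, h]
    · rw [ih]
      simp only [pvFoldMin, List.foldl_cons, pvBestStep, h]

theorem pvNested_eq_foldMin (index : PySem.Dict String (Int × List (String × String)))
    (name : String) (n maxlen : Int) (acc : Option (Int × List (String × String))) :
    (PySem.List.pyRange 0 (n + 1) 1).foldl (fun best i =>
      (PySem.List.pyRange i (min n (i + maxlen) + 1) 1).foldl
        (fun best j => pvBestStep index name best i j) best) acc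
    = pvFoldMin ((pvPairs n maxlen).filterMap
        (fun ij => index.get? (PySem.Str.slice name (some ij.1) (some ij.2)))) acc := by
  rw [← pvFold_pairs]
  simp only [pvPairs, List.foldl_flatMap, List.foldl_map]

theorem pvFoldMin_eq (cands : List (Int × List (String × String)))
    (cm : Int × List (String × String)) (acc : Option (Int × List (String × String)))
    (h1 : ∀ c ∈ cands, cm.1 ≤ c.1) (h2 : ∀ c ∈ cands, c.1 = cm.1 → c = cm)
    (hacc : acc = none ∨ ∃ a, acc = some a ∧ cm.1 ≤ a.1 ∧ (a.1 = cm.1 → a = cm))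
    (hmem : cm ∈ cands ∨ acc = some cm) :
    pvFoldMin cands acc = some cm := by
  induction cands generalizing acc with
  | nil =>
    rcases hmem with h | h
    · simp at h
    · simpa [pvFoldMin] using h
  | cons c t ih =>
    simp only [pvFoldMin, List.foldl_cons]
    have hc1 : cm.1 ≤ c.1 := h1 c (by simp)
    have hc2 : c.1 = cm.1 → c = cm := h2 c (by simp)
    set acc' := (match acc with
      | none => some c
      | some b => if c.1 < b.1 then some c else acc) with hacc'
    have hinv : acc' = none ∨ ∃ a, acc' = some a ∧ cm.1 ≤ a.1 ∧ (a.1 = cm.1 → a = cm) := by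
      rcases hacc with h | ⟨a, ha, ha1, ha2⟩
      · subst h; exact Or.inr ⟨c, rfl, hc1, hc2⟩
      · subst ha
        simp only [hacc']
        by_cases hlt : c.1 < a.1
        · simp only [if_pos hlt]; exact Or.inr ⟨c, rfl, hc1, hc2⟩
        · simp only [if_neg hlt]; exact Or.inr ⟨a, rfl, ha1, ha2⟩
    refine ih _ (fun x hx => h1 x (List.mem_cons_of_mem _ hx)) (fun x hx => h2 x (List.mem_cons_of_mem _ hx)) hinv ?_
    rcases hmem with hm | hm
    · rcases List.mem_cons.mp hm with hm | hm
      · right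
        subst hm
        rcases hacc with h | ⟨a, ha, ha1, ha2⟩
        · simp [hacc', h]
        · subst ha
          simp only [hacc']
          by_cases hlt : cm.1 < a.1
          · simp [hlt]
          · have : a.1 = cm.1 := le_antisymm (by omega) ha1
            simp [hlt, ha2 this]
      · exact Or.inl hm
    · right
      subst hm
      simp only [hacc']
      have : ¬ c.1 < cm.1 := by omega
      simp [this]

-- a slice of name (with 0 ≤ i, 0 ≤ j) is an infix of name
theorem pvSlice_infix (name : String) (i j : Int) (hi : 0 ≤ i) (hj : 0 ≤ j) :
    (PySem.Str.slice name (some i) (some j)).toList <:+: name.toList := by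
  rw [PySem.Str.toList_slice, PySem.Chars.slice_eq_listSlice, PySem.List.slice_toNat _ hi hj]
  exact ((name.toList.drop i.toNat).take_prefix _).isInfix.trans (name.toList.drop_suffix i.toNat).isInfix

-- an infix of name is some slice name[i:j] with (i, j) ∈ pvPairs (len name)
theorem pvInfix_mem_pairs (name k : String) (maxlen : Int) (h : k.toList <:+: name.toList)
    (hk : (k.toList.length : Int) ≤ maxlen) :
    ∃ ij ∈ pvPairs ((PySem.Str.len name : Int)) maxlen,
      PySem.Str.slice name (some ij.1) (some ij.2) = k := by
  obtain ⟨s, t, hst⟩ := h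
  refine ⟨((s.length : Int), ((s.length + k.toList.length : Nat) : Int)), ?_, ?_⟩
  · have hlen : s.length + k.toList.length ≤ name.toList.length := by
      rw [← hst]; simp only [List.length_append]; omega
    have hn : (PySem.Str.len name : Int) = (name.toList.length : Int) := by
      simp [PySem.Str.len_eq]
    simp only [pvPairs, List.mem_flatMap, List.mem_map]
    refine ⟨(s.length : Int), ?_, ⟨((s.length + k.toList.length : Nat) : Int), ?_, rfl⟩⟩
    · rw [PySem.List.mem_pyRange_one]; constructor
      · positivity
      · rw [hn]; push_cast; omega
    · rw [PySem.List.mem_pyRange_one]; constructor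
      · push_cast; omega
      · have h1 : ((s.length + k.toList.length : Nat) : Int) < (PySem.Str.len name : Int) + 1 := by
          rw [hn]; push_cast; omega
        have h2 : ((s.length + k.toList.length : Nat) : Int) < (s.length : Int) + maxlen + 1 := by
          push_cast; push_cast at hk; omega
        omega
  · apply String.toList_inj.mp
    rw [PySem.Str.toList_slice, PySem.Chars.slice_eq_listSlice,
      PySem.List.slice_toNat _ (by positivity) (by positivity)]
    simp only [Int.toNat_natCast]
    rw [← hst, List.append_assoc, List.drop_left' (by simp),
      show s.length + k.toList.length - s.length = k.toList.length by omega]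
    exact List.take_left' rfl

-- pvPairs only contains nonnegative pairs
theorem pvPairs_nonneg (n maxlen : Int) (ij : Int × Int) (h : ij ∈ pvPairs n maxlen) : 0 ≤ ij.1 ∧ 0 ≤ ij.2 := by
  simp only [pvPairs, List.mem_flatMap, List.mem_map] at h
  obtain ⟨i, hi, j, hj, hij⟩ := h
  rw [PySem.List.mem_pyRange_one] at hi hj
  subst hij
  constructor <;> simp <;> omega

theorem pvIndexOne_append (st : PySem.Dict String (Int × List (String × String)) × Int)
    (l1 l2 : List (String × List (String × String))) :
    pvIndexOne (pvIndexOne st l1) l2 = pvIndexOne st (l1 ++ l2) := by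
  rcases st with ⟨d, r⟩
  simp [pvIndexOne, List.foldl_append]

-- B's whole computation, re-expressed through pvFirstKey / pvFoldMin
theorem pvB_eq (fname : String) (inv jc yoko : List (String × List (String × String))) :
    encontrar_match_para_imagen_alt fname inv jc yoko
    = (pvFoldMin ((pvPairs (PySem.Str.len (PySem.Str.lower fname))
          ((pvIndexOne (PySem.Dict.empty, 0) (inv ++ jc ++ yoko)).1.keys.foldl
            (fun m k => max m (PySem.Str.len k)) 0)).filterMap
        (fun ij => pvFirstKey (PySem.Str.slice (PySem.Str.lower fname) (some ij.1) (some ij.2))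
          (inv ++ jc ++ yoko) 0)) none).map (·.2) := by
  simp only [encontrar_match_para_imagen_alt]
  rw [pvIndexOne_append, pvIndexOne_append, ← List.append_assoc]
  rw [pvNested_eq_foldMin]
  have hfun : (fun ij : Int × Int =>
      (pvIndexOne (PySem.Dict.empty, 0) (inv ++ jc ++ yoko)).1.get?
        (PySem.Str.slice (PySem.Str.lower fname) (some ij.1) (some ij.2)))
      = (fun ij : Int × Int =>
      pvFirstKey (PySem.Str.slice (PySem.Str.lower fname) (some ij.1) (some ij.2))
        (inv ++ jc ++ yoko) 0) := by
    funext ij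
    rw [pvIndexOne_get?]
    simp [Option.orElse]
  rw [hfun]

-- ===== VERDICT (by name: the statement is the Claim_ definition above) =====
theorem encontrar_match_para_imagen_spec : Claim_equal_encontrar_match_para_imagen := by
  intro fname inv jc yoko _
  show encontrar_match_para_imagen fname inv jc yoko = encontrar_match_para_imagen_alt fname inv jc yoko
  rw [pvA_eq_find?, pvB_eq]
  set name := PySem.Str.lower fname with hname
  set all := inv ++ jc ++ yoko with hall
  set maxlen := (pvIndexOne (PySem.Dict.empty, 0) all).1.keys.foldl
      (fun m k => max m (PySem.Str.len k)) 0 with hmaxlen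
  set cands := (pvPairs (PySem.Str.len name) maxlen).filterMap
      (fun ij => pvFirstKey (PySem.Str.slice name (some ij.1) (some ij.2)) all 0) with hcands
  -- every candidate is (position, record) of a matching entry
  have hc_char : ∀ c ∈ cands, ∃ (n' : ℕ) (hn' : n' < all.length),
      c = ((n' : Int), all[n'].2) ∧ pvMatch name all[n'] = true := by
    intro c hc
    rw [hcands, List.mem_filterMap] at hc
    obtain ⟨ij, hij, hget⟩ := hc
    obtain ⟨hi0, hj0⟩ := pvPairs_nonneg _ _ _ hij
    obtain ⟨n', hn', hq, hkey, hv, -⟩ := pvFirstKey_some _ _ _ c.1 c.2 (by simpa using hget)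
    refine ⟨n', hn', ?_, ?_⟩
    · have : c = (c.1, c.2) := rfl
      rw [this, hq, hv]; simp
    · rw [pvMatch, PySem.Str.isIn_iff_infix, hkey]
      exact pvSlice_infix name ij.1 ij.2 hi0 hj0
  rcases hfind : all.find? (pvMatch name) with _ | p0
  · -- no record matches: the candidate list is empty
    have : cands = [] := by
      rw [List.eq_nil_iff_forall_not_mem]
      intro c hc
      obtain ⟨n', hn', -, hm⟩ := hc_char c hc
      exact absurd hm (by simpa using List.find?_eq_none.mp hfind _ (List.getElem_mem hn'))
    rw [this]; rfl
  · -- p0 is the first match, at position m = as.length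
    obtain ⟨hp0, as, bs, hsplit, hfirst⟩ := List.find?_eq_some_iff_append.mp hfind
    have hm : as.length < all.length := by rw [hsplit]; simp
    have hm' : as.length < (as ++ p0 :: bs).length := by simp
    have hallm : all[as.length]'hm = p0 := by
      rw [List.getElem_of_eq hsplit]
      rw [List.getElem_append_right (le_refl as.length)]
      simp
    -- positions below m do not match
    have hbelow : ∀ (n' : ℕ) (hn' : n' < all.length), n' < as.length → ¬ pvMatch name (all[n']'hn') = true := by
      intro n' hn' hlt
      have : all[n']'hn' ∈ as := by
        rw [List.getElem_of_eq hsplit, List.getElem_append_left hlt]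
        exact List.getElem_mem hlt
      simpa using hfirst _ this
    have hcm1 : ∀ c ∈ cands, ((as.length : Int)) ≤ c.1 := by
      intro c hc
      obtain ⟨n', hn', hc', hm'⟩ := hc_char c hc
      have : ¬ n' < as.length := fun h => hbelow n' hn' h hm'
      rw [hc']
      exact_mod_cast by omega
    have hcm2 : ∀ c ∈ cands, c.1 = ((as.length : Int)) → c = ((as.length : Int), p0.2) := by
      intro c hc he
      obtain ⟨n', hn', hc', -⟩ := hc_char c hc
      have : n' = as.length := by rw [hc'] at he; simp at he; exact_mod_cast he
      subst this
      rw [hc', hallm]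
    have hcm_mem : ((as.length : Int), p0.2) ∈ cands := by
      have hinf : (pvKey p0).toList <:+: name.toList := by
        rw [← PySem.Str.isIn_iff_infix]
        simpa [pvMatch] using hp0
      have hkeymem : pvKey p0 ∈ (pvIndexOne (PySem.Dict.empty, 0) all).1.keys := by
        rw [← PySem.Dict.contains_iff_mem_keys, PySem.Dict.contains_eq_isSome_get?, pvIndexOne_get?]
        rcases hfk0 : pvFirstKey (pvKey p0) all 0 with _ | qv
        · exact absurd (by rw [hallm]) (pvFirstKey_none _ _ _ hfk0 as.length hm)
        · simp [Option.orElse, hfk0]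
      have hmax : ((pvKey p0).toList.length : Int) ≤ maxlen := by
        have := (PySem.List.le_foldl_max_int
          ((pvIndexOne (PySem.Dict.empty, 0) all).1.keys) PySem.Str.len 0).2 _ hkeymem
        rw [hmaxlen]
        simpa [PySem.Str.len_eq] using this
      obtain ⟨ij, hij, hsl⟩ := pvInfix_mem_pairs name (pvKey p0) maxlen hinf hmax
      rw [hcands, List.mem_filterMap]
      refine ⟨ij, hij, ?_⟩
      rw [hsl]
      -- pvFirstKey (pvKey p0) all 0 = some (as.length, p0.2)
      rcases hfk : pvFirstKey (pvKey p0) all 0 with _ | qv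
      · exact absurd (by rw [hallm]) (pvFirstKey_none _ _ _ hfk as.length hm)
      · obtain ⟨n0, hn0, hq0, hkey0, hv0, hmin0⟩ := pvFirstKey_some _ _ _ qv.1 qv.2 (by simpa using hfk)
        have hle : n0 ≤ as.length := by
          by_contra hgt
          exact hmin0 as.length (by omega) (by rw [hallm])
        have hmatch0 : pvMatch name (all[n0]'hn0) = true := by
          rw [pvMatch, hkey0]
          simpa [pvMatch] using hp0
        have hge : ¬ n0 < as.length := fun h => hbelow n0 hn0 h hmatch0
        have hn0eq : n0 = as.length := by omega
        subst hn0eq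
        have hqv : qv = ((as.length : Int), p0.2) := by
          have h2 : qv = (qv.1, qv.2) := rfl
          rw [h2, hq0, hv0, hallm]
          simp
        rw [hqv]
    rw [pvFoldMin_eq cands ((as.length : Int), p0.2) none hcm1 hcm2 (Or.inl rfl) (Or.inl hcm_mem)]
    rfl
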